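-- pv_equiv track=rewrite | github.com/Itinerant18/AURA | services/audit-service/src/routes.py | _best_content_score
-- ===== SOURCE A (Python) =====
-- def _best_content_score(posts: list) -> int:
--     if not posts:
--         return 30
--     max_eng = max((p.get("engagement", 0) for p in posts), default=0)
--     if max_eng > 500:
--         return 90
--     if max_eng > 100:
--         return 70
--     return 45
-- ===== SOURCE B (Python) =====
-- def _post_score(p) -> int:
--     e = p.get("engagement", 0)
--     if e > 500:
--         return 90
--     if e > 100:
--         return 70
--     return 45
--
-- def _best_content_score(posts: list) -> int:
--     if not posts:
--         return 30
--     best = 45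
--     for p in posts:
--         s = _post_score(p)
--         if s == 90:
--             return 90
--         if s > best:
--             best = s
--     return best
-- ===== Notes on version B (the rewrite author's own statement) =====
-- stated objective: alternative
-- what changed: B commutes classification with aggregation: each post is mapped to its own score (90/70/45) and the scores are folded with max and an early exit at 90, instead of taking the max engagement first and classifying it once.
import Mathlib
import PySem

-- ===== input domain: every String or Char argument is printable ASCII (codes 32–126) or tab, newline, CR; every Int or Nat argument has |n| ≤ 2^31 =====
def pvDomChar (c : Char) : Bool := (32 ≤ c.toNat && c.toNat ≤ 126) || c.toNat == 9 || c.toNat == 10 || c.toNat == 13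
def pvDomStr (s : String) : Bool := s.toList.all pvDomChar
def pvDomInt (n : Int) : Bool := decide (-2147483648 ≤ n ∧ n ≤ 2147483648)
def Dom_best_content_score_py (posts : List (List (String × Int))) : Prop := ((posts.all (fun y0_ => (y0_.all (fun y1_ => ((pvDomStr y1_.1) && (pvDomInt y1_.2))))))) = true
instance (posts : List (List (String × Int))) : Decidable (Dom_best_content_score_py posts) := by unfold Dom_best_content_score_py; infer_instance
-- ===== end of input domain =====

-- B commutes classification with aggregation: each post gets its own score (90/70/45), folded with max and an early exit at 90 (alternative decomposition; same cost).

-- ===== PORT A =====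
def best_content_score_py (posts : List (List (String × Int))) : Int :=
  if posts = [] then 30
  else
    let max_eng := PySem.List.maxD (posts.map (fun p => PySem.Dict.getD ⟨p⟩ "engagement" 0)) (fun x => x) 0
    if max_eng > 500 then 90
    else if max_eng > 100 then 70
    else 45

-- ===== PORT B =====
def pvPostScore (p : List (String × Int)) : Int :=
  let e := PySem.Dict.getD ⟨p⟩ "engagement" 0
  if e > 500 then 90
  else if e > 100 then 70
  else 45

def pvScoreLoop : List (List (String × Int)) → Int → Int
  | [], best => best
  | p :: rest, best =>
    let s := pvPostScore p
    if s == 90 then 90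
    else if s > best then pvScoreLoop rest s
    else pvScoreLoop rest best

def best_content_score_py_alt (posts : List (List (String × Int))) : Int :=
  if posts = [] then 30
  else pvScoreLoop posts 45

-- ===== PRECONDITION & SPEC =====
def Spec_best_content_score_py (posts : List (List (String × Int))) (out : Int) : Prop := out = best_content_score_py_alt posts
instance (posts : List (List (String × Int))) (out : Int) : Decidable (Spec_best_content_score_py posts out) := by unfold Spec_best_content_score_py; infer_instance

-- ===== CLAIM (what is proved, stated in full; the proofs are below) =====
def Claim_equal_best_content_score_py : Prop := ∀ (posts : List (List (String × Int))), Dom_best_content_score_py posts → Spec_best_content_score_py posts (best_content_score_py posts)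

-- ===== LEMMAS AND PROOFS =====

-- a running max over a nonempty list exceeds c iff some element does
theorem pv_foldl_max_gt (t : List Int) (a c : Int) :
    (t.foldl max a > c) ↔ (a > c ∨ ∃ y ∈ t, y > c) := by
  constructor
  · intro h
    rcases PySem.List.foldl_max_mem t a with he | he
    · exact Or.inl (he ▸ h)
    · exact Or.inr ⟨_, he, h⟩
  · rintro (h | ⟨y, hy, h⟩)
    · exact lt_of_lt_of_le h (PySem.List.le_foldl_max t a).1
    · exact lt_of_lt_of_le h ((PySem.List.le_foldl_max t a).2 y hy)

-- the max over projected engagements exceeds c iff some post's engagement does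
theorem pv_maxD_gt (p : List (String × Int)) (rest : List (List (String × Int))) (c : Int) :
    (PySem.List.maxD ((p :: rest).map (fun q => PySem.Dict.getD ⟨q⟩ "engagement" 0)) (fun x => x) 0 > c)
      ↔ (p :: rest).any (fun q => PySem.Dict.getD ⟨q⟩ "engagement" 0 > c) = true := by
  unfold PySem.List.maxD
  rw [List.map_cons, PySem.List.max?_id_cons, Option.getD_some, pv_foldl_max_gt]
  simp [List.any_cons, List.any_eq_true]

-- characterisation of B's early-exit score loop for accumulators 45 and 70
theorem pv_loop_eq (l : List (List (String × Int))) (best : Int) (hb : best = 45 ∨ best = 70) :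
    pvScoreLoop l best =
      if l.any (fun q => PySem.Dict.getD ⟨q⟩ "engagement" 0 > 500) then 90
      else if best = 70 ∨ l.any (fun q => PySem.Dict.getD ⟨q⟩ "engagement" 0 > 100) then 70
      else 45 := by
  induction l generalizing best with
  | nil =>
    simp only [pvScoreLoop, List.any_nil]
    rcases hb with h | h <;> subst h <;> simp
  | cons p rest ih =>
    simp only [pvScoreLoop, pvPostScore, List.any_cons]
    by_cases h5 : PySem.Dict.getD ⟨p⟩ "engagement" 0 > 500
    · simp [h5]
    · by_cases h1 : PySem.Dict.getD ⟨p⟩ "engagement" 0 > 100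
      · rcases hb with h | h <;> subst h <;>
          simp [h5, h1, ih _ (Or.inr rfl)]
      · rcases hb with h | h <;> subst h <;>
          simp [h5, h1, ih _ (Or.inl rfl), ih _ (Or.inr rfl)]

-- ===== VERDICT (by name: the statement is the Claim_ definition above) =====
theorem best_content_score_py_spec : Claim_equal_best_content_score_py := by
  intro posts _
  unfold Spec_best_content_score_py best_content_score_py best_content_score_py_alt
  cases posts with
  | nil => rfl
  | cons p rest =>
    simp only [if_neg (List.cons_ne_nil p rest)]
    rw [pv_loop_eq _ 45 (Or.inl rfl)]
    by_cases h5 : (p :: rest).any (fun q => PySem.Dict.getD ⟨q⟩ "engagement" 0 > 500) = true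
    · rw [if_pos ((pv_maxD_gt p rest 500).mpr h5), if_pos h5]
    · rw [if_neg (fun hc => h5 ((pv_maxD_gt p rest 500).mp hc)), if_neg h5]
      by_cases h1 : (p :: rest).any (fun q => PySem.Dict.getD ⟨q⟩ "engagement" 0 > 100) = true
      · rw [if_pos ((pv_maxD_gt p rest 100).mpr h1), if_pos (Or.inr h1)]
      · rw [if_neg (fun hc => h1 ((pv_maxD_gt p rest 100).mp hc)),
            if_neg (fun hc => hc.elim (fun h => by norm_num at h) h1)]
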